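-- pv_equiv track=rewrite | github.com/mikkovihonen/quadletman | scripts/podman_feature_check.py | diff_keys
-- ===== SOURCE A (Python) =====
-- def diff_keys(
--     latest: dict[str, set[str]], previous: dict[str, set[str]]
-- ) -> tuple[dict[str, set[str]], dict[str, set[str]], set[str]]:
--     """Diff two parsed key dicts.
--
--     Returns (new_keys, removed_keys, new_unit_types).
--     """
--     all_sections = set(latest) | set(previous)
--     new_keys: dict[str, set[str]] = {}
--     removed_keys: dict[str, set[str]] = {}
--     new_unit_types: set[str] = set(latest) - set(previous)
--
--     for section in all_sections:
--         cur = latest.get(section, set())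
--         prev = previous.get(section, set())
--         added = cur - prev
--         removed = prev - cur
--         if added:
--             new_keys[section] = added
--         if removed:
--             removed_keys[section] = removed
--
--     return new_keys, removed_keys, new_unit_types
-- ===== SOURCE B (Python) =====
-- def diff_keys(
--     latest: dict[str, set[str]], previous: dict[str, set[str]]
-- ) -> tuple[dict[str, set[str]], dict[str, set[str]], set[str]]:
--     """Diff two parsed key dicts, two directional passes instead of one union-set pass.
--
--     Returns (new_keys, removed_keys, new_unit_types).
--     """
--     new_keys: dict[str, set[str]] = {}
--     removed_keys: dict[str, set[str]] = {}
--     for section, cur in latest.items():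
--         prev = previous.get(section, set())
--         if (added := cur - prev):
--             new_keys[section] = added
--         if (removed := prev - cur):
--             removed_keys[section] = removed
--     for section, prev in previous.items():
--         if section not in latest and prev:
--             removed_keys[section] = prev
--     new_unit_types = latest.keys() - previous.keys()
--     return new_keys, removed_keys, new_unit_types
-- ===== Notes on version B (the rewrite author's own statement) =====
-- stated objective: alternative
-- what changed: Replaces A's single loop over the union-of-sections set (with symmetric get() on both dicts per section) by two directional passes: one over latest computing both diffs for sections latest has, and one over previous that collects sections dropped from latest, where the removed set is the stored set itself with no set difference; no union set is built.
import Mathlib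
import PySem

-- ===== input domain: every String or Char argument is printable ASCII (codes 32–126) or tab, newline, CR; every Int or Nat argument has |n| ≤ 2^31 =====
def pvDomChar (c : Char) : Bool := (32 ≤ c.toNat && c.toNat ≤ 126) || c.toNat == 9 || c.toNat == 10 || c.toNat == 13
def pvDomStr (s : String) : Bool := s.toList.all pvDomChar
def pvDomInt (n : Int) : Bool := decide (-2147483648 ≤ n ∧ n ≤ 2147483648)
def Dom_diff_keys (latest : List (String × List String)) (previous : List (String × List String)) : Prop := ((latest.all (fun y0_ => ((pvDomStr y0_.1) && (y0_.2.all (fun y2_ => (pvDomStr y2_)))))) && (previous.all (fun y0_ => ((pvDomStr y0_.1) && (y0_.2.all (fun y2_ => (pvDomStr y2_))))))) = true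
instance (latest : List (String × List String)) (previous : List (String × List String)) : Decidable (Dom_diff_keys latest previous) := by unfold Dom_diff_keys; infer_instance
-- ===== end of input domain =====

-- B replaces A's single loop over the union of all sections by two directional passes: one over
-- latest (computing both diffs for sections latest has) and one over previous collecting dropped
-- sections, whose removed set is the stored set itself (no set difference, no union set built).
-- Python A inserts into its result dicts while iterating a set (hash order); dict/set results are
-- compared as unordered dict/set values, and both ports enumerate sections in first-insertion order.

-- ===== PORT A =====
def diff_keys (latest : List (String × List String)) (previous : List (String × List String)) : (List (String × List String)) × (List (String × List String)) × List String :=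
  let all_sections : PySem.Set String :=
    PySem.Set.union (PySem.Set.ofList (latest.map Prod.fst)) (PySem.Set.ofList (previous.map Prod.fst))
  let new_unit_types : PySem.Set String :=
    PySem.Set.diff (PySem.Set.ofList (latest.map Prod.fst)) (PySem.Set.ofList (previous.map Prod.fst))
  let loop := all_sections.foldl
    (fun (acc : List (String × List String) × List (String × List String)) sec =>
      let cur := (PySem.Dict.mk latest).getD sec []
      let prev := (PySem.Dict.mk previous).getD sec []
      let added := PySem.Set.diff cur prev
      let removed := PySem.Set.diff prev cur
      ((if added ≠ [] then acc.1 ++ [(sec, added)] else acc.1),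
       (if removed ≠ [] then acc.2 ++ [(sec, removed)] else acc.2))) ([], [])
  (loop.1, loop.2, new_unit_types)

-- ===== PORT B =====
def diff_keys_alt (latest : List (String × List String)) (previous : List (String × List String)) : (List (String × List String)) × (List (String × List String)) × List String :=
  let firstPass := latest.foldl
    (fun (acc : List (String × List String) × List (String × List String)) p =>
      let prev := (PySem.Dict.mk previous).getD p.1 []
      let added := PySem.Set.diff p.2 prev
      let removed := PySem.Set.diff prev p.2
      ((if added ≠ [] then acc.1 ++ [(p.1, added)] else acc.1),
       (if removed ≠ [] then acc.2 ++ [(p.1, removed)] else acc.2))) ([], [])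
  let removed_keys := previous.foldl
    (fun acc p => if (PySem.Dict.mk latest).contains p.1 = false ∧ p.2 ≠ [] then acc ++ [p] else acc)
    firstPass.2
  let new_unit_types : PySem.Set String :=
    PySem.Set.diff (PySem.Set.ofList (latest.map Prod.fst)) (PySem.Set.ofList (previous.map Prod.fst))
  (firstPass.1, removed_keys, new_unit_types)

-- ===== PRECONDITION & SPEC =====
-- Pre_ excludes association lists carrying a duplicated section name: those do not encode any
-- Python dict (A's parameters are dicts, which cannot hold duplicate keys), so nothing is claimed there.
def Pre_diff_keys (latest : List (String × List String)) (previous : List (String × List String)) : Prop :=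
  (latest.map Prod.fst).Nodup ∧ (previous.map Prod.fst).Nodup
instance (latest : List (String × List String)) (previous : List (String × List String)) : Decidable (Pre_diff_keys latest previous) := by unfold Pre_diff_keys; infer_instance
def pvWitness_diff_keys : (List (String × List String)) × (List (String × List String)) :=
  ([("Unit", ["Description", "After"]), ("Container", ["Image"])], [("Unit", ["Description"])])

def Spec_diff_keys (latest : List (String × List String)) (previous : List (String × List String)) (out : (List (String × List String)) × (List (String × List String)) × List String) : Prop := out = diff_keys_alt latest previous
instance (latest : List (String × List String)) (previous : List (String × List String)) (out : (List (String × List String)) × (List (String × List String)) × List String) : Decidable (Spec_diff_keys latest previous out) := by unfold Spec_diff_keys; infer_instance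

-- ===== CLAIM (what is proved, stated in full; the proofs are below) =====
def Claim_equal_diff_keys : Prop := ∀ (latest : List (String × List String)) (previous : List (String × List String)), Dom_diff_keys latest previous → Pre_diff_keys latest previous → Spec_diff_keys latest previous (diff_keys latest previous)

-- ===== LEMMAS AND PROOFS =====
theorem pvFoldlPairSnd {α β γ : Type} (g : γ → β → γ) (l : List β) (a : α) (b : γ) :
    l.foldl (fun acc x => (acc.1, g acc.2 x)) (a, b) = (a, l.foldl g b) := by
  induction l generalizing b with
  | nil => rfl
  | cons x xs ih => simpa using ih (g b x)


theorem pvDictGetD (l : List (String × List String)) (hl : (l.map Prod.fst).Nodup)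
    (p : String × List String) (hm : p ∈ l) : (PySem.Dict.mk l).getD p.1 [] = p.2 :=
  PySem.Dict.getD_of_mem_items (PySem.Dict.mk l) hm (by simpa [PySem.Dict.keys_mk] using hl) []

theorem pvDictContainsFalse (l : List (String × List String)) (s : String)
    (h : s ∉ l.map Prod.fst) : (PySem.Dict.mk l).contains s = false := by
  simp only [PySem.Dict.contains_mk, List.any_eq_false]
  intro p hp hb
  exact h ((beq_iff_eq.mp hb) ▸ List.mem_map_of_mem hp)

theorem pvDictContainsTrue (l : List (String × List String)) (s : String)
    (h : s ∈ l.map Prod.fst) : (PySem.Dict.mk l).contains s = true := by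
  simp only [PySem.Dict.contains_mk, List.any_eq_true]
  obtain ⟨p, hp, he⟩ := List.mem_map.mp h
  exact ⟨p, hp, by simp [he]⟩

-- ===== VERDICT (by name: the statement is the Claim_ definition above) =====
theorem diff_keys_spec : Claim_equal_diff_keys := by
  intro latest previous _ hpre
  obtain ⟨hl, hp⟩ := hpre
  unfold Spec_diff_keys
  unfold diff_keys diff_keys_alt
  simp only []
  have hall : PySem.Set.union (PySem.Set.ofList (latest.map Prod.fst)) (PySem.Set.ofList (previous.map Prod.fst))
      = latest.map Prod.fst ++ (previous.map Prod.fst).filter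
          (fun y => !(PySem.Set.contains (latest.map Prod.fst) y)) := by
    show PySem.Set.update _ _ = _
    rw [PySem.Set.update_eq_append_filter, PySem.Set.ofList_ofList,
        PySem.Set.ofList_eq_self_of_nodup _ hl, PySem.Set.ofList_eq_self_of_nodup _ hp]
  rw [hall, List.foldl_append]
  -- first pass
  have h1 : ∀ init : List (String × List String) × List (String × List String),
      List.foldl (fun acc sec =>
        ((if PySem.Set.diff ((PySem.Dict.mk latest).getD sec []) ((PySem.Dict.mk previous).getD sec []) ≠ [] then acc.1 ++ [(sec, PySem.Set.diff ((PySem.Dict.mk latest).getD sec []) ((PySem.Dict.mk previous).getD sec []))] else acc.1),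
         (if PySem.Set.diff ((PySem.Dict.mk previous).getD sec []) ((PySem.Dict.mk latest).getD sec []) ≠ [] then acc.2 ++ [(sec, PySem.Set.diff ((PySem.Dict.mk previous).getD sec []) ((PySem.Dict.mk latest).getD sec []))] else acc.2)))
        init (latest.map Prod.fst)
      = List.foldl (fun acc p =>
          ((if PySem.Set.diff p.2 ((PySem.Dict.mk previous).getD p.1 []) ≠ [] then acc.1 ++ [(p.1, PySem.Set.diff p.2 ((PySem.Dict.mk previous).getD p.1 []))] else acc.1),
           (if PySem.Set.diff ((PySem.Dict.mk previous).getD p.1 []) p.2 ≠ [] then acc.2 ++ [(p.1, PySem.Set.diff ((PySem.Dict.mk previous).getD p.1 []) p.2)] else acc.2)))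
          init latest := by
    intro init
    rw [List.foldl_map]
    exact PySem.List.foldl_congr_mem _ _ _ _ (by
      intro acc x hx
      rw [pvDictGetD latest hl x hx])
  rw [h1]
  -- second pass
  have h2 : ∀ init : List (String × List String) × List (String × List String),
      List.foldl (fun acc sec =>
        ((if PySem.Set.diff ((PySem.Dict.mk latest).getD sec []) ((PySem.Dict.mk previous).getD sec []) ≠ [] then acc.1 ++ [(sec, PySem.Set.diff ((PySem.Dict.mk latest).getD sec []) ((PySem.Dict.mk previous).getD sec []))] else acc.1),
         (if PySem.Set.diff ((PySem.Dict.mk previous).getD sec []) ((PySem.Dict.mk latest).getD sec []) ≠ [] then acc.2 ++ [(sec, PySem.Set.diff ((PySem.Dict.mk previous).getD sec []) ((PySem.Dict.mk latest).getD sec []))] else acc.2)))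
        init ((previous.map Prod.fst).filter (fun y => !(PySem.Set.contains (latest.map Prod.fst) y)))
      = (init.1, List.foldl (fun acc p => if (PySem.Dict.mk latest).contains p.1 = false ∧ p.2 ≠ [] then acc ++ [p] else acc) init.2 previous) := by
    intro init
    obtain ⟨i1, i2⟩ := init
    rw [List.foldl_filter, List.foldl_map]
    refine Eq.trans (PySem.List.foldl_congr_mem _ _
        (fun (acc : List (String × List String) × List (String × List String)) (p : String × List String) =>
          (acc.1, if (PySem.Dict.mk latest).contains p.1 = false ∧ p.2 ≠ [] then acc.2 ++ [p] else acc.2))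
        (i1, i2) ?_)
      (pvFoldlPairSnd
        (fun (c : List (String × List String)) (p : String × List String) =>
          if (PySem.Dict.mk latest).contains p.1 = false ∧ p.2 ≠ [] then c ++ [p] else c)
        previous i1 i2)
    intro acc p hmem
    by_cases hin : p.1 ∈ latest.map Prod.fst
    · have hq : (PySem.Set.contains (latest.map Prod.fst) p.1) = true := by
        simpa [PySem.Set.contains_eq_listContains] using hin
      simp only [hq, Bool.not_true, pvDictContainsTrue latest p.1 hin]
      simp
    · have hq : (PySem.Set.contains (latest.map Prod.fst) p.1) = false := by
        simpa [PySem.Set.contains_eq_listContains] using hin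
      have hc := pvDictContainsFalse latest p.1 hin
      have hgd : (PySem.Dict.mk latest).getD p.1 [] = [] :=
        PySem.Dict.getD_of_not_contains _ _ hc
      have hgp : (PySem.Dict.mk previous).getD p.1 [] = p.2 := pvDictGetD previous hp p hmem
      simp only [hq, Bool.not_false, if_true, hgd, hgp, hc]
      simp [PySem.Set.diff]
  rw [h2]
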